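-- pv_equiv track=rewrite | github.com/posl/comment_recommendation | script/mod_gen/5_time/zh/162_D/0.py | get_num_of_triple
-- ===== SOURCE A (Python) =====
-- def get_num_of_triple(s):
--     n = len(s)
--     num = 0
--     for i in range(n):
--         for j in range(i+1, n):
--             for k in range(j+1, n):
--                 if s[i] != s[j] and s[i] != s[k] and s[j] != s[k] and j - i != k - j:
--                     num += 1
--     return num
-- ===== SOURCE B (Python) =====
-- def get_num_of_triple(s):
--     # For each pair j < k with s[j] != s[k], count valid i < j using running
--     # character counts of the prefix s[:j], and subtract the single equidistant
--     # candidate i = 2*j - k when it is a valid distinct-character index.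
--     n = len(s)
--     cnt = {}
--     num = 0
--     for j in range(n):
--         for k in range(j + 1, n):
--             if s[j] != s[k]:
--                 num += j - cnt.get(s[j], 0) - cnt.get(s[k], 0)
--                 i = 2 * j - k
--                 if i >= 0 and s[i] != s[j] and s[i] != s[k]:
--                     num -= 1
--         cnt[s[j]] = cnt.get(s[j], 0) + 1
--     return num
-- ===== Notes on version B (the rewrite author's own statement) =====
-- stated objective: faster
-- what changed: A enumerates all O(n^3) index triples; B loops only over pairs j<k, counting the admissible i<j in O(1) from running prefix character counts kept in a dict and subtracting the single equidistant candidate i=2j-k.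
import Mathlib
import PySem

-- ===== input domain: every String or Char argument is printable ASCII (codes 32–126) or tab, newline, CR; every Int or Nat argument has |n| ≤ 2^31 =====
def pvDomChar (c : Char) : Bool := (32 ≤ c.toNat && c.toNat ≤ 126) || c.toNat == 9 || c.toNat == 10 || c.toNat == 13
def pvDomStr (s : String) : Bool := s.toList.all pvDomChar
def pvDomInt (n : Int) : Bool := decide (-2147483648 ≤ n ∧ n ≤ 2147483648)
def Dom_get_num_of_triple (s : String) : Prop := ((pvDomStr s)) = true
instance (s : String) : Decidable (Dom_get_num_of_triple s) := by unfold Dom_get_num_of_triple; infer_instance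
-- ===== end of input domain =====

-- B replaces A's cubic triple loop by a quadratic pair loop: for each pair j < k it counts
-- valid i < j from running prefix character counts and subtracts the lone equidistant candidate.


-- ===== PORT A =====
def get_num_of_triple (s : String) : Int :=
  let n : Int := PySem.Str.len s
  (PySem.List.pyRange 0 n 1).foldl (fun num i =>
    (PySem.List.pyRange (i+1) n 1).foldl (fun num j =>
      (PySem.List.pyRange (j+1) n 1).foldl (fun num k =>
        if PySem.Str.pyGet? s i ≠ PySem.Str.pyGet? s j ∧ PySem.Str.pyGet? s i ≠ PySem.Str.pyGet? s k ∧
           PySem.Str.pyGet? s j ≠ PySem.Str.pyGet? s k ∧ j - i ≠ k - j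
        then num + 1 else num) num) num) 0

-- ===== PORT B =====
def get_num_of_triple_alt (s : String) : Int :=
  let n : Int := PySem.Str.len s
  let st := (PySem.List.pyRange 0 n 1).foldl (fun (st : Int × PySem.Dict (Option Char) Int) j =>
      let num := (PySem.List.pyRange (j+1) n 1).foldl (fun num k =>
        if PySem.Str.pyGet? s j ≠ PySem.Str.pyGet? s k then
          let num := num + j - st.2.getD (PySem.Str.pyGet? s j) 0 - st.2.getD (PySem.Str.pyGet? s k) 0
          let i := 2 * j - k
          if 0 ≤ i ∧ PySem.Str.pyGet? s i ≠ PySem.Str.pyGet? s j ∧ PySem.Str.pyGet? s i ≠ PySem.Str.pyGet? s k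
          then num - 1 else num
        else num) st.1
      (num, st.2.insert (PySem.Str.pyGet? s j) (st.2.getD (PySem.Str.pyGet? s j) 0 + 1)))
    ((0 : Int), PySem.Dict.empty)
  st.1

-- ===== PRECONDITION & SPEC =====
def Spec_get_num_of_triple (s : String) (out : Int) : Prop := out = get_num_of_triple_alt s
instance (s : String) (out : Int) : Decidable (Spec_get_num_of_triple s out) := by unfold Spec_get_num_of_triple; infer_instance

-- ===== CLAIM (what is proved, stated in full; the proofs are below) =====
def Claim_equal_get_num_of_triple : Prop := ∀ (s : String), Dom_get_num_of_triple s → Spec_get_num_of_triple s (get_num_of_triple s)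

-- ===== LEMMAS AND PROOFS =====

-- the triple's condition, on the character list
def pvCond (l : List Char) (i j k : Int) : Bool :=
  PySem.List.pyGet? l i ≠ PySem.List.pyGet? l j ∧ PySem.List.pyGet? l i ≠ PySem.List.pyGet? l k ∧
  PySem.List.pyGet? l j ≠ PySem.List.pyGet? l k ∧ j - i ≠ k - j

-- the characters of the prefix of length m, as B's dict sees them (as Option values)
def pvKeys (l : List Char) (m : Int) : List (Option Char) :=
  (PySem.List.pyRange 0 m 1).map (fun i => PySem.List.pyGet? l i)

-- B's contribution for the pair (j, k)
def pvBTerm (l : List Char) (j k : Int) : Int :=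
  if PySem.List.pyGet? l j ≠ PySem.List.pyGet? l k then
    (j - ((pvKeys l j).count (PySem.List.pyGet? l j) : Int) - ((pvKeys l j).count (PySem.List.pyGet? l k) : Int))
    - (if 0 ≤ 2*j - k ∧ PySem.List.pyGet? l (2*j - k) ≠ PySem.List.pyGet? l j ∧ PySem.List.pyGet? l (2*j - k) ≠ PySem.List.pyGet? l k then 1 else 0)
  else 0

theorem pvIcoTop (a b : Int) (h : a ≤ b) (f : Int → Int) :
    ∑ i ∈ Finset.Ico a (b+1), f i = (∑ i ∈ Finset.Ico a b, f i) + f b := by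
  rw [show Finset.Ico a (b+1) = insert b (Finset.Ico a b) by ext x; simp [Finset.mem_Ico]; omega,
     Finset.sum_insert (by simp [Finset.mem_Ico])]
  ring

-- sum over a step-1 Python range is a Finset.Ico sum
theorem pvSumR (a b : Int) (g : Int → Int) :
    ((PySem.List.pyRange a b 1).map g).sum = ∑ x ∈ Finset.Ico a b, g x := by
  by_cases h : b ≤ a
  · rw [PySem.List.pyRange_one_eq_nil h, Finset.Ico_eq_empty (by omega)]; rfl
  · obtain ⟨m, hm⟩ : ∃ m : ℕ, b = a + m := ⟨(b - a).toNat, by omega⟩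
    subst hm
    induction m with
    | zero => simp [PySem.List.pyRange_one_eq_nil]
    | succ m ih =>
      push_cast
      rw [show a + ((m : Int) + 1) = (a + m) + 1 by ring, PySem.List.pyRange_one_succ_right (by omega),
          pvIcoTop a (a + m) (by omega), List.map_append, List.sum_append]
      rcases Nat.eq_zero_or_pos m with rfl | hm
      · simp [PySem.List.pyRange_one_eq_nil]
      · rw [ih (by omega)]; simp

theorem pvSwap2 (n : Int) (h : 0 ≤ n) (f : Int → Int → Int) :
    ∑ i ∈ Finset.Ico 0 n, ∑ j ∈ Finset.Ico (i+1) n, f i j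
      = ∑ j ∈ Finset.Ico 0 n, ∑ i ∈ Finset.Ico 0 j, f i j := by
  obtain ⟨m, rfl⟩ := Int.eq_ofNat_of_zero_le h
  induction m with
  | zero => simp
  | succ m ih =>
    push_cast
    rw [pvIcoTop 0 m (by positivity) (fun i => ∑ j ∈ Finset.Ico (i+1) ((m:Int)+1), f i j),
        pvIcoTop 0 m (by positivity) (fun j => ∑ i ∈ Finset.Ico 0 j, f i j),
        Finset.sum_congr rfl (fun i hi => pvIcoTop (i+1) m (by simp [Finset.mem_Ico] at hi; omega) (fun j => f i j)),
        Finset.sum_add_distrib]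
    push_cast at ih
    rw [ih (by positivity)]
    simp

theorem pvSwap3 (n : Int) (h : 0 ≤ n) (f : Int → Int → Int → Int) :
    ∑ i ∈ Finset.Ico 0 n, ∑ j ∈ Finset.Ico (i+1) n, ∑ k ∈ Finset.Ico (j+1) n, f i j k
      = ∑ j ∈ Finset.Ico 0 n, ∑ k ∈ Finset.Ico (j+1) n, ∑ i ∈ Finset.Ico 0 j, f i j k := by
  rw [pvSwap2 n h (fun i j => ∑ k ∈ Finset.Ico (j+1) n, f i j k)]
  exact Finset.sum_congr rfl (fun j _ => Finset.sum_comm)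

-- A as a triple Ico sum of the indicator
theorem pvA_eq (s : String) :
    get_num_of_triple s
      = ∑ i ∈ Finset.Ico 0 ((s.toList.length : Int)),
          ∑ j ∈ Finset.Ico (i+1) ((s.toList.length : Int)),
            ∑ k ∈ Finset.Ico (j+1) ((s.toList.length : Int)),
              (if pvCond s.toList i j k then (1 : Int) else 0) := by
  simp only [get_num_of_triple, PySem.List.foldl_ite_add_one, PySem.List.foldl_add, zero_add]
  simp only [← PySem.List.sum_map_ite_one_zero']
  simp only [pvSumR]
  simp [pvCond, -Finset.sum_boole]
  rfl

-- two distinct values: the elements equal to neither, counted by complement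
theorem pvCountP_two_nat (a b : Option Char) (hab : a ≠ b) (xs : List (Option Char)) :
    xs.countP (fun x => decide (¬ x = a ∧ ¬ x = b)) + xs.count a + xs.count b = xs.length := by
  induction xs with
  | nil => simp
  | cons x xs ih =>
    simp only [List.countP_cons, List.count_cons, List.length_cons, beq_iff_eq, decide_eq_true_eq]
    split_ifs <;> first | omega | simp_all

theorem pvCountP_two (a b : Option Char) (hab : a ≠ b) (xs : List (Option Char)) :
    (xs.countP (fun x => decide (¬ x = a ∧ ¬ x = b)) : Int)
      = (xs.length : Int) - (xs.count a : Int) - (xs.count b : Int) := by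
  have := pvCountP_two_nat a b hab xs
  omega

-- the inner i-count of A equals B's pair contribution
theorem pvInner_eq (l : List Char) (j k : Int) (h0 : 0 ≤ j) (hjk : j < k) :
    (∑ i ∈ Finset.Ico 0 j, (if pvCond l i j k then (1 : Int) else 0)) = pvBTerm l j k := by
  by_cases hc : PySem.List.pyGet? l j = PySem.List.pyGet? l k
  · rw [pvBTerm, if_neg (by simp [hc])]
    apply Finset.sum_eq_zero
    intro i _
    rw [if_neg (by simp [pvCond, hc])]
  · rw [pvBTerm, if_pos (by simp [hc])]
    -- split the indicator in the sum
    have hsplit : ∀ i : Int, (if pvCond l i j k then (1 : Int) else 0)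
        = (if (¬ PySem.List.pyGet? l i = PySem.List.pyGet? l j ∧ ¬ PySem.List.pyGet? l i = PySem.List.pyGet? l k) then (1 : Int) else 0)
          - (if i = 2*j - k ∧ (¬ PySem.List.pyGet? l i = PySem.List.pyGet? l j ∧ ¬ PySem.List.pyGet? l i = PySem.List.pyGet? l k) then (1 : Int) else 0) := by
      intro i
      simp only [pvCond, decide_eq_true_eq]
      by_cases h1 : (¬ PySem.List.pyGet? l i = PySem.List.pyGet? l j ∧ ¬ PySem.List.pyGet? l i = PySem.List.pyGet? l k)
      · by_cases h2 : i = 2*j - k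
        · rw [if_neg (fun h => h.2.2.2 (by omega)), if_pos h1, if_pos ⟨h2, h1⟩]
          ring
        · rw [if_pos ⟨h1.1, h1.2, hc, by omega⟩, if_pos h1, if_neg (by tauto)]
          ring
      · rw [if_neg (by tauto), if_neg (by tauto), if_neg (by tauto)]
        ring
    simp only [hsplit, Finset.sum_sub_distrib]
    congr 1
    · -- count of "neither" over the prefix
      rw [← pvSumR 0 j (fun i => if (¬ PySem.List.pyGet? l i = PySem.List.pyGet? l j ∧ ¬ PySem.List.pyGet? l i = PySem.List.pyGet? l k) then (1 : Int) else 0)]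
      rw [PySem.List.sum_map_ite_one_zero']
      have hmap : (PySem.List.pyRange 0 j 1).countP
            (fun i => decide (¬ PySem.List.pyGet? l i = PySem.List.pyGet? l j ∧ ¬ PySem.List.pyGet? l i = PySem.List.pyGet? l k))
          = (pvKeys l j).countP (fun x => decide (¬ x = PySem.List.pyGet? l j ∧ ¬ x = PySem.List.pyGet? l k)) := by
        rw [pvKeys, List.countP_map]
        rfl
      rw [hmap, pvCountP_two _ _ hc]
      have hlen : ((pvKeys l j).length : Int) = j := by
        simp [pvKeys, PySem.List.length_pyRange_one]
        omega
      rw [hlen]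
    · -- the equidistant correction term
      have hform : ∀ x : Int, (if x = 2*j - k ∧ (¬ PySem.List.pyGet? l x = PySem.List.pyGet? l j ∧ ¬ PySem.List.pyGet? l x = PySem.List.pyGet? l k) then (1:Int) else 0)
          = if x = 2*j - k then (if (¬ PySem.List.pyGet? l x = PySem.List.pyGet? l j ∧ ¬ PySem.List.pyGet? l x = PySem.List.pyGet? l k) then (1:Int) else 0) else 0 := by
        intro x
        split_ifs <;> tauto
      simp only [hform]
      rw [Finset.sum_ite_eq' (Finset.Ico 0 j) (2*j - k)]
      by_cases hin : 0 ≤ 2*j - k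
      · rw [if_pos (by simp [Finset.mem_Ico]; omega)]
        split_ifs with hA hB hB
        · rfl
        · exact absurd ⟨hin, hA.1, hA.2⟩ hB
        · exact absurd ⟨hB.2.1, hB.2.2⟩ hA
        · rfl
      · rw [if_neg (by simp [Finset.mem_Ico]; omega), if_neg (fun h => hin h.1)]


-- B's loop invariant: partial-loop state = (partial double sum, prefix counter)
theorem pvB_loop (s : String) (m : ℕ) (hm : (m : Int) ≤ PySem.Str.len s) :
    (PySem.List.pyRange 0 (m : Int) 1).foldl
      (fun (st : Int × PySem.Dict (Option Char) Int) j =>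
        let num := (PySem.List.pyRange (j+1) (PySem.Str.len s) 1).foldl (fun num k =>
          if PySem.Str.pyGet? s j ≠ PySem.Str.pyGet? s k then
            let num := num + j - st.2.getD (PySem.Str.pyGet? s j) 0 - st.2.getD (PySem.Str.pyGet? s k) 0
            let i := 2 * j - k
            if 0 ≤ i ∧ PySem.Str.pyGet? s i ≠ PySem.Str.pyGet? s j ∧ PySem.Str.pyGet? s i ≠ PySem.Str.pyGet? s k
            then num - 1 else num
          else num) st.1
        (num, st.2.insert (PySem.Str.pyGet? s j) (st.2.getD (PySem.Str.pyGet? s j) 0 + 1)))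
      ((0 : Int), PySem.Dict.empty)
    = (∑ j ∈ Finset.Ico 0 (m : Int), ∑ k ∈ Finset.Ico (j+1) (PySem.Str.len s), pvBTerm s.toList j k,
       (pvKeys s.toList (m : Int)).foldl (fun d x => d.insert x (d.getD x 0 + 1)) PySem.Dict.empty) := by
  induction m with
  | zero => simp [PySem.List.pyRange_one_eq_nil, pvKeys]
  | succ m ih =>
    push_cast
    rw [PySem.List.pyRange_one_succ_right (by positivity), List.foldl_append, ih (by push_cast at hm ⊢; omega)]
    simp only [List.foldl_cons, List.foldl_nil, PySem.Dict.getD_foldl_insert_add_one,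
      PySem.Dict.getD_empty, zero_add]
    have hkeys : pvKeys s.toList ((m : Int) + 1) = pvKeys s.toList (m : Int) ++ [PySem.List.pyGet? s.toList (m : Int)] := by
      rw [pvKeys, pvKeys, PySem.List.pyRange_one_succ_right (by positivity), List.map_append]
      rfl
    simp only [Prod.mk.injEq]
    constructor
    · refine Eq.trans (PySem.List.foldl_congr_mem _ _ (fun num k => num + pvBTerm s.toList (m : Int) k) _ ?_) ?_
      · intro num k hk
        simp only [pvBTerm]
        simp only [PySem.Str.pyGet?_eq, PySem.Chars.pyGet?_eq_listPyGet?]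
        split_ifs <;> ring
      · rw [PySem.List.foldl_add, pvSumR,
          pvIcoTop 0 (m : Int) (by positivity) (fun j => ∑ k ∈ Finset.Ico (j+1) (PySem.Str.len s), pvBTerm s.toList j k)]
    · rw [hkeys, List.foldl_append]
      simp [PySem.Dict.getD_foldl_insert_add_one, PySem.Dict.getD_empty]

-- B as a double Ico sum
theorem pvB_eq (s : String) :
    get_num_of_triple_alt s
      = ∑ j ∈ Finset.Ico 0 ((s.toList.length : Int)),
          ∑ k ∈ Finset.Ico (j+1) ((s.toList.length : Int)), pvBTerm s.toList j k := by
  have h := congrArg Prod.fst (pvB_loop s s.toList.length (by simp))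
  unfold get_num_of_triple_alt
  simp only [PySem.Str.len_eq] at h ⊢
  exact h

-- ===== VERDICT (by name: the statement is the Claim_ definition above) =====
theorem get_num_of_triple_spec : Claim_equal_get_num_of_triple := by
  intro s _
  unfold Spec_get_num_of_triple
  rw [pvA_eq, pvB_eq, pvSwap3 _ (by positivity)]
  refine Finset.sum_congr rfl (fun j hj => Finset.sum_congr rfl (fun k hk => ?_))
  simp only [Finset.mem_Ico] at hj hk
  exact pvInner_eq s.toList j k hj.1 hk.1
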